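-- pv_equiv track=rewrite | github.com/shekelboi/DevOps-Interview-Tasks | Compute checksums/main.py | compute_checksums
-- ===== SOURCE A (Python) =====
-- def compute_checksums(file_bytes):
--     result = []
--     index = 0
--     while index < len(file_bytes):
--         header = file_bytes[index]
--         index += 1
--         total = sum(file_bytes[index:index + header])
--         result.append(total % 256)
--         index += header
--     return result
-- ===== SOURCE B (Python) =====
-- def compute_checksums(file_bytes):
--     # Single linear pass: `remaining` counts bytes left in the current block
--     # (0 = expecting a header), `total` accumulates the block sum.
--     result = []
--     remaining = 0
--     total = 0
--     for b in file_bytes: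
--         if remaining == 0:
--             if b == 0:
--                 result.append(0)
--             else:
--                 remaining = b
--                 total = 0
--         else:
--             total += b
--             remaining -= 1
--             if remaining == 0:
--                 result.append(total % 256)
--     if remaining > 0:  # truncated final block: checksum of what is present
--         result.append(total % 256)
--     return result
-- ===== Notes on version B (the rewrite author's own statement) =====
-- stated objective: alternative
-- what changed: Replaces the index-and-slice while loop (re-slicing the list for each block) with one structural pass over the bytes maintaining a remaining-count and a running block total.
-- outside the precondition, e.g. on compute_checksums([1, 3, -2, 0]): A returns [3, 0, 254], B returns [3]
import Mathlib
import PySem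

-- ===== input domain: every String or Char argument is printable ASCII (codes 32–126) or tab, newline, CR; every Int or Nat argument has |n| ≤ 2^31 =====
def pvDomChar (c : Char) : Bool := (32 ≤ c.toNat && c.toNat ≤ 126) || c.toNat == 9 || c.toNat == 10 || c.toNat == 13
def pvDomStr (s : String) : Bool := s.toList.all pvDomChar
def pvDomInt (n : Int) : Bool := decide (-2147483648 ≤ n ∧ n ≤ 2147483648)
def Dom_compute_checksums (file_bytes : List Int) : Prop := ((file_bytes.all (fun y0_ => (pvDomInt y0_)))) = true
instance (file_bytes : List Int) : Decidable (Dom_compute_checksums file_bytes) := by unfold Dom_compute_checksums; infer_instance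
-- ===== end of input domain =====

-- B replaces the index-and-slice while loop with one structural pass keeping a
-- remaining-count and a running block total (alternative decomposition, same cost).

-- ===== PORT A =====
-- Literal port of A's while loop. `fuel` only makes the loop total in Lean:
-- inside Pre_ (all headers nonnegative) the index advances by at least 1 per
-- iteration, so `file_bytes.length` iterations always suffice.
def computeLoopA (fb : List Int) (fuel : Nat) (index : Int) (result : List Int) : List Int :=
  match fuel with
  | 0 => result
  | fuel + 1 =>
    if index < (fb.length : Int) then
      match PySem.List.pyGet? fb index with
      | none => result   -- IndexError: unreachable for 0 ≤ index < len
      | some header =>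
        let index := index + 1
        let total := (PySem.List.slice fb (some index) (some (index + header))).sum
        computeLoopA fb fuel (index + header) (result ++ [PySem.Int.mod total 256])
    else result

def compute_checksums (file_bytes : List Int) : List Int :=
  computeLoopA file_bytes file_bytes.length 0 []

-- ===== PORT B =====
def altLoop (bs : List Int) (remaining total : Int) (result : List Int) : List Int :=
  match bs with
  | [] => if 0 < remaining then result ++ [PySem.Int.mod total 256] else result
  | b :: rest =>
    if remaining = 0 then
      if b = 0 then altLoop rest 0 total (result ++ [0])
      else altLoop rest b 0 result
    else
      let total := total + b
      let remaining := remaining - 1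
      if remaining = 0 then altLoop rest 0 total (result ++ [PySem.Int.mod total 256])
      else altLoop rest remaining total result

def compute_checksums_alt (file_bytes : List Int) : List Int :=
  altLoop file_bytes 0 0 []

-- ===== PRECONDITION & SPEC =====
-- Pre_ excludes lists in which some header byte (a value read in header
-- position of the length-prefixed stream) is negative: there A's index jumps
-- backwards and A loops forever or rereads earlier bytes, behaviour no natural
-- reimplementation should match.
def headersOkF : Nat → List Int → Bool
  | _, [] => true
  | 0, _ :: _ => true          -- unreachable: headersOk always passes fuel ≥ length
  | f + 1, h :: t => (0 ≤ h : Bool) && headersOkF f (t.drop h.toNat)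

def headersOk (bs : List Int) : Bool := headersOkF bs.length bs

def Pre_compute_checksums (file_bytes : List Int) : Prop := headersOk file_bytes = true
instance (file_bytes : List Int) : Decidable (Pre_compute_checksums file_bytes) := by unfold Pre_compute_checksums; infer_instance

def pvWitness_compute_checksums : List Int := [2, 1, 2, 0, 1, 7]

def Spec_compute_checksums (file_bytes : List Int) (out : List Int) : Prop := out = compute_checksums_alt file_bytes
instance (file_bytes : List Int) (out : List Int) : Decidable (Spec_compute_checksums file_bytes out) := by unfold Spec_compute_checksums; infer_instance

-- ===== CLAIM (what is proved, stated in full; the proofs are below) =====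
def Claim_equal_compute_checksums : Prop := ∀ (file_bytes : List Int), Dom_compute_checksums file_bytes → Pre_compute_checksums file_bytes → Spec_compute_checksums file_bytes (compute_checksums file_bytes)

-- ===== LEMMAS AND PROOFS =====

theorem headersOkF_fuel : ∀ (f f' : Nat) (t : List Int), t.length ≤ f → t.length ≤ f' →
    headersOkF f t = headersOkF f' t := by
  intro f
  induction f with
  | zero =>
    intro f' t h h'
    have : t = [] := List.eq_nil_of_length_eq_zero (by omega)
    subst this
    cases f' <;> rfl
  | succ f ih =>
    intro f' t h h'
    cases t with
    | nil => cases f' <;> rfl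
    | cons b rest =>
      cases f' with
      | zero => simp at h'
      | succ f' =>
        simp only [headersOkF]
        rw [ih f' (rest.drop b.toNat)
          (by have := List.length_drop (l := rest) (i := b.toNat); simp at h ⊢; omega)
          (by have := List.length_drop (l := rest) (i := b.toNat); simp at h' ⊢; omega)]

theorem headersOk_cons (h : Int) (t : List Int) :
    headersOk (h :: t) = ((0 ≤ h : Bool) && headersOk (t.drop h.toNat)) := by
  unfold headersOk
  simp only [List.length_cons, headersOkF]
  rw [headersOkF_fuel t.length (t.drop h.toNat).length (t.drop h.toNat) (by simp) le_rfl]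


-- Reference block decomposition: checksum of each length-prefixed block.
def specBlocks : List Int → List Int
  | [] => []
  | h :: t =>
    PySem.Int.mod (t.take h.toNat).sum 256 :: specBlocks (t.drop h.toNat)
termination_by l => l.length
decreasing_by simp

theorem alt_spec : ∀ (n : Nat) (bs : List Int), bs.length ≤ n →
    (headersOk bs = true → ∀ t result, altLoop bs 0 t result = result ++ specBlocks bs) ∧
    (∀ r t result, 0 < r → headersOk (bs.drop r.toNat) = true →
      altLoop bs r t result =
        result ++ PySem.Int.mod (t + (bs.take r.toNat).sum) 256 :: specBlocks (bs.drop r.toNat)) := by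
  intro n
  induction n with
  | zero =>
    intro bs hlen
    have hbs : bs = [] := List.eq_nil_of_length_eq_zero (by omega)
    subst hbs
    constructor
    · intro _ t result; simp [altLoop, specBlocks]
    · intro r t result hr _
      simp [altLoop, specBlocks, hr]
  | succ n ih =>
    intro bs hlen
    cases bs with
    | nil =>
      constructor
      · intro _ t result; simp [altLoop, specBlocks]
      · intro r t result hr _
        simp [altLoop, specBlocks, hr]
    | cons b rest =>
      have hrest : rest.length ≤ n := by simpa using Nat.lt_succ_iff.mp (by simpa using hlen)
      constructor
      · intro hok t result
        obtain ⟨hb, hok2⟩ : 0 ≤ b ∧ headersOk (rest.drop b.toNat) = true := by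
          rw [headersOk_cons] at hok
          simpa using hok
        by_cases hb0 : b = 0
        · subst hb0
          rw [show altLoop (0 :: rest) 0 t result = altLoop rest 0 t (result ++ [0]) by
            simp [altLoop]]
          rw [(ih rest hrest).1 (by simpa using hok2)]
          have hm : PySem.Int.mod 0 256 = 0 := by decide
          simp [specBlocks]
        · have hbpos : 0 < b := lt_of_le_of_ne hb (Ne.symm hb0)
          rw [show altLoop (b :: rest) 0 t result = altLoop rest b 0 result by
            simp [altLoop, hb0]]
          rw [(ih rest hrest).2 b 0 result hbpos hok2]
          simp [specBlocks]
      · intro r t result hr hok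
        have hrne : ¬ r = 0 := by omega
        have h1 : r.toNat = (r - 1).toNat + 1 := by omega
        have hdrop : (b :: rest).drop r.toNat = rest.drop (r - 1).toNat := by
          rw [h1]; rfl
        have htake : (b :: rest).take r.toNat = b :: rest.take (r - 1).toNat := by
          rw [h1]; rfl
        by_cases hr1 : r - 1 = 0
        · have hokr : headersOk (rest.drop (r - 1).toNat) = true := by
            rw [← hdrop]; exact hok
          rw [hr1] at hokr
          rw [show altLoop (b :: rest) r t result
              = altLoop rest 0 (t + b) (result ++ [PySem.Int.mod (t + b) 256]) by
            simp [altLoop, hrne, hr1]]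
          rw [(ih rest hrest).1 (by simpa using hokr)]
          rw [htake, hdrop, hr1]
          simp
        · have hrpos : 0 < r - 1 := by omega
          rw [show altLoop (b :: rest) r t result = altLoop rest (r - 1) (t + b) result by
            simp [altLoop, hrne, hr1]]
          rw [(ih rest hrest).2 (r - 1) (t + b) result hrpos (by rw [← hdrop]; exact hok)]
          rw [htake, hdrop]
          simp
          ring_nf

theorem a_spec : ∀ (fuel : Nat) (fb : List Int) (index : Int) (result : List Int),
    0 ≤ index → fb.length - index.toNat ≤ fuel →
    headersOk (fb.drop index.toNat) = true →
    computeLoopA fb fuel index result = result ++ specBlocks (fb.drop index.toNat) := by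
  intro fuel
  induction fuel with
  | zero =>
    intro fb index result h0 hfu hok
    have hge : fb.length ≤ index.toNat := by omega
    simp [computeLoopA, List.drop_eq_nil_of_le hge, specBlocks]
  | succ fuel ih =>
    intro fb index result h0 hfu hok
    by_cases hlt : index < (fb.length : Int)
    · have hlt' : index.toNat < fb.length := by omega
      have hget : PySem.List.pyGet? fb index = some (fb[index.toNat]'hlt') :=
        PySem.List.pyGet?_eq_some_getElem fb h0 hlt
      set header := fb[index.toNat]'hlt' with hh
      have hdropc : fb.drop index.toNat = header :: fb.drop (index.toNat + 1) :=
        List.drop_eq_getElem_cons hlt'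
      obtain ⟨hhd, hok2⟩ :
          0 ≤ header ∧ headersOk ((fb.drop (index.toNat + 1)).drop header.toNat) = true := by
        rw [hdropc, headersOk_cons] at hok
        simpa using hok
      have hslice : PySem.List.slice fb (some (index + 1)) (some (index + 1 + header))
          = (fb.drop (index.toNat + 1)).take header.toNat := by
        rw [PySem.List.slice_toNat fb (by omega) (by omega)]
        rw [show (index + 1 + header).toNat - (index + 1).toNat = header.toNat by omega,
            show (index + 1).toNat = index.toNat + 1 by omega]
      have hdd : fb.drop (index + 1 + header).toNat
          = (fb.drop (index.toNat + 1)).drop header.toNat := by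
        rw [List.drop_drop]
        rw [show (index + 1 + header).toNat = index.toNat + 1 + header.toNat by omega]
      rw [show computeLoopA fb (fuel + 1) index result
          = computeLoopA fb fuel (index + 1 + header)
              (result ++ [PySem.Int.mod ((PySem.List.slice fb (some (index + 1))
                (some (index + 1 + header))).sum) 256]) by
        simp [computeLoopA, hlt, hget]]
      rw [ih fb (index + 1 + header) _ (by omega) (by omega) (by rw [hdd]; exact hok2)]
      rw [hdd, hslice, hdropc]
      simp [specBlocks]
    · have hge : fb.length ≤ index.toNat := by omega
      simp [computeLoopA, hlt, List.drop_eq_nil_of_le hge, specBlocks]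

-- ===== VERDICT (by name: the statement is the Claim_ definition above) =====
theorem compute_checksums_spec : Claim_equal_compute_checksums := by
  intro fb _ hpre
  unfold Spec_compute_checksums compute_checksums compute_checksums_alt
  rw [a_spec fb.length fb 0 [] le_rfl (by simp) (by simpa using hpre),
      (alt_spec fb.length fb le_rfl).1 hpre]
  simp
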